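-- pv_equiv track=rewrite | github.com/juanauli/Inversion-Sequences-Consecutive-Patterns-of-Length-4 | consec_detect4.py | detect3210
-- ===== SOURCE A (Python) =====
-- def detect3210(sequence):
--     index = 0
--     while index < len(sequence) - 3:
--         if sequence[index + 3] < sequence[index + 2] < sequence[index + 1] <\
--                 sequence[index]:
--             return True
--         index += 1
--     return False
-- ===== SOURCE B (Python) =====
-- def detect3210(sequence):
--     run = 1
--     for j in range(1, len(sequence)):
--         if sequence[j] < sequence[j - 1]:
--             run += 1
--             if run >= 4:
--                 return True
--         else:
--             run = 1
--     return False
-- ===== Notes on version B (the rewrite author's own statement) =====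
-- stated objective: faster
-- what changed: Replaced the sliding 4-window re-check (each window re-compares three overlapping pairs) with a single pass over adjacent pairs maintaining the length of the current strictly-decreasing run, returning True when it reaches 4.
import Mathlib
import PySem

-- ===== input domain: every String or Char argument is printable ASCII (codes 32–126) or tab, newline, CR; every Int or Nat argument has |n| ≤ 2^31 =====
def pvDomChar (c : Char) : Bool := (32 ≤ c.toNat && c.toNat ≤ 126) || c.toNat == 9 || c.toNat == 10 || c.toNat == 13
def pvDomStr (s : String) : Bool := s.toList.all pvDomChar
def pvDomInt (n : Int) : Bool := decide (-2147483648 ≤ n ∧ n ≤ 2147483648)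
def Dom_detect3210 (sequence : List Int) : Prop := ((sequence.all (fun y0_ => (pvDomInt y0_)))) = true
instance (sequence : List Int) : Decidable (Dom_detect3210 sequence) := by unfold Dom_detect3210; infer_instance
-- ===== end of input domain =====

-- B replaces A's overlapping 4-element window checks with a single adjacent-pair pass
-- maintaining a strictly-decreasing run length (alternative decomposition, same result).


-- ===== PORT A =====
-- while index < len(sequence) - 3: indices index..index+3 are in range under the
-- guard, so getD is exact here.
def detect3210Loop (s : List Int) (index : Nat) : Bool :=
  if index + 3 < s.length then
    if s.getD (index + 3) 0 < s.getD (index + 2) 0 ∧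
        s.getD (index + 2) 0 < s.getD (index + 1) 0 ∧
        s.getD (index + 1) 0 < s.getD index 0 then
      true
    else
      detect3210Loop s (index + 1)
  else
    false
termination_by s.length - index

def detect3210 (sequence : List Int) : Bool := detect3210Loop sequence 0

-- ===== PORT B =====
-- prev = last element seen, run = length of the current strictly-decreasing run.
def detect3210AltLoop (prev : Int) (run : Nat) (rest : List Int) : Bool :=
  match rest with
  | [] => false
  | x :: xs =>
    if x < prev then
      if run + 1 ≥ 4 then true else detect3210AltLoop x (run + 1) xs
    else
      detect3210AltLoop x 1 xs

def detect3210_alt (sequence : List Int) : Bool :=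
  match sequence with
  | [] => false
  | x :: xs => detect3210AltLoop x 1 xs

-- ===== PRECONDITION & SPEC =====
def Spec_detect3210 (sequence : List Int) (out : Bool) : Prop := out = detect3210_alt sequence
instance (sequence : List Int) (out : Bool) : Decidable (Spec_detect3210 sequence out) := by unfold Spec_detect3210; infer_instance

-- ===== CLAIM (what is proved, stated in full; the proofs are below) =====
def Claim_equal_detect3210 : Prop := ∀ (sequence : List Int), Dom_detect3210 sequence → Spec_detect3210 sequence (detect3210 sequence)

-- ===== LEMMAS AND PROOFS =====

-- Reference characterisation: some 4 consecutive elements strictly decrease.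
def hasDesc4 : List Int → Bool
  | a :: b :: c :: d :: rest => (d < c && c < b && b < a) || hasDesc4 (b :: c :: d :: rest)
  | _ => false

theorem hasDesc4_nondesc (x y : Int) (ys : List Int) (h : ¬ y < x) :
    hasDesc4 (x :: y :: ys) = hasDesc4 (y :: ys) := by
  match ys with
  | [] => rfl
  | [c] => rfl
  | c :: d :: rest =>
    simp [hasDesc4, h]

theorem hasDesc4_nondesc2 (a x y : Int) (ys : List Int) (h : ¬ y < x) :
    hasDesc4 (a :: x :: y :: ys) = hasDesc4 (x :: y :: ys) := by
  match ys with
  | [] => rfl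
  | c :: rest =>
    simp [hasDesc4, h]

theorem altLoop_spec (xs : List Int) :
    ∀ x : Int,
      (detect3210AltLoop x 1 xs = hasDesc4 (x :: xs)) ∧
      (∀ a : Int, x < a → detect3210AltLoop x 2 xs = hasDesc4 (a :: x :: xs)) ∧
      (∀ a b : Int, x < b → b < a → detect3210AltLoop x 3 xs = hasDesc4 (a :: b :: x :: xs)) := by
  induction xs with
  | nil =>
    intro x
    refine ⟨rfl, fun a _ => rfl, fun a b _ _ => ?_⟩
    rfl
  | cons y ys ih =>
    intro x
    obtain ⟨ih1, ih2, ih3⟩ := ih y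
    refine ⟨?_, ?_, ?_⟩
    · by_cases h : y < x
      · simp [detect3210AltLoop, h]
        exact (ih2 x h).symm ▸ rfl
      · simp [detect3210AltLoop, h, hasDesc4_nondesc x y ys h]
        exact ih1
    · intro a hxa
      by_cases h : y < x
      · simp [detect3210AltLoop, h]
        exact ih3 a x h hxa
      · simp [detect3210AltLoop, h, hasDesc4_nondesc2 a x y ys h,
          hasDesc4_nondesc x y ys h]
        exact ih1
    · intro a b hxb hba
      by_cases h : y < x
      · simp [detect3210AltLoop, h, hasDesc4, hxb, hba]
      · have e1 : hasDesc4 (a :: b :: x :: y :: ys) = hasDesc4 (b :: x :: y :: ys) := by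
          simp [hasDesc4, h]
        simp [detect3210AltLoop, h, e1, hasDesc4_nondesc2 b x y ys h,
          hasDesc4_nondesc x y ys h]
        exact ih1

theorem alt_eq_hasDesc4 (s : List Int) : detect3210_alt s = hasDesc4 s := by
  match s with
  | [] => rfl
  | x :: xs => exact (altLoop_spec xs x).1

set_option maxRecDepth 8192 in
theorem aLoop_eq_hasDesc4 (s : List Int) :
    ∀ index : Nat, detect3210Loop s index = hasDesc4 (s.drop index) := by
  intro index
  induction hn : s.length - index using Nat.strong_induction_on generalizing index with
  | _ n ih =>
    by_cases h : index + 3 < s.length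
    · have h0 : index < s.length := by omega
      have h1 : index + 1 < s.length := by omega
      have h2 : index + 2 < s.length := by omega
      have hd : s.drop index = s[index] :: s[index+1] :: s[index+2] :: s[index+3] :: s.drop (index + 4) := by
        rw [List.drop_eq_getElem_cons h0, List.drop_eq_getElem_cons h1,
          List.drop_eq_getElem_cons h2, List.drop_eq_getElem_cons h]
      have hd1 : s.drop (index + 1) = s[index+1] :: s[index+2] :: s[index+3] :: s.drop (index + 4) := by
        rw [List.drop_eq_getElem_cons h1, List.drop_eq_getElem_cons h2,
          List.drop_eq_getElem_cons h]
      rw [detect3210Loop]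
      simp only [h, if_true]
      rw [List.getD_eq_getElem s 0 h, List.getD_eq_getElem s 0 h0,
        List.getD_eq_getElem s 0 h1, List.getD_eq_getElem s 0 h2]
      by_cases hc : s[index+3] < s[index+2] ∧ s[index+2] < s[index+1] ∧ s[index+1] < s[index]
      · simp only [hc, if_true]
        rw [hd]
        simp [hasDesc4, hc.1, hc.2.1, hc.2.2]
      · simp only [hc, if_false]
        rw [ih (s.length - (index + 1)) (by omega) (index + 1) rfl]
        rw [hd, hd1, hasDesc4]
        have hsplit : ¬ (s[index+3] < s[index+2]) ∨ ¬ (s[index+2] < s[index+1]) ∨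
            ¬ (s[index+1] < s[index]) := by tauto
        rcases hsplit with h' | h' | h' <;> simp [h']
    · rw [detect3210Loop]
      simp only [h, if_false]
      have : s.length ≤ index + 3 := by omega
      match hm : s.drop index with
      | [] => rfl
      | [a] => rfl
      | [a, b] => rfl
      | [a, b, c] => rfl
      | a :: b :: c :: d :: rest =>
        exfalso
        have := List.length_drop (l := s) (i := index)
        rw [hm] at this
        simp at this
        omega

-- ===== VERDICT (by name: the statement is the Claim_ definition above) =====
theorem detect3210_spec : Claim_equal_detect3210 := by
  intro s _
  unfold Spec_detect3210
  rw [alt_eq_hasDesc4]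
  show detect3210Loop s 0 = hasDesc4 s
  rw [aLoop_eq_hasDesc4 s 0]
  rfl
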